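-- pv_equiv track=rewrite | github.com/Parthsawant1298/generate | generate.py | clean_csv_data
-- ===== SOURCE A (Python) =====
-- def clean_csv_data(csv_data):
--     # Split into lines and remove empty lines
--     lines = csv_data.splitlines()
--     cleaned_lines = [line.strip() for line in lines if line.strip()]
--
--     # Ensure consistent number of columns
--     if cleaned_lines:
--         first_line_cols = len(cleaned_lines[0].split(','))
--         cleaned_lines = [
--             line for line in cleaned_lines
--             if len(line.split(',')) == first_line_cols
--         ]
--
--     return "\n".join(cleaned_lines)
-- ===== SOURCE B (Python) =====
-- def clean_csv_data(csv_data):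
--     # Bucket the stripped non-empty lines by their column count; the answer is
--     # simply the bucket that the first kept line falls into (no filtering pass).
--     buckets = {}
--     first_key = None
--     for line in csv_data.splitlines():
--         s = line.strip()
--         if not s:
--             continue
--         k = len(s.split(','))
--         if first_key is None:
--             first_key = k
--         buckets.setdefault(k, []).append(s)
--     if first_key is None:
--         return ""
--     return "\n".join(buckets[first_key])
-- ===== Notes on version B (the rewrite author's own statement) =====
-- stated objective: alternative
-- what changed: B buckets the stripped non-empty lines into a dict keyed by column count in one pass and returns the bucket owned by the first kept line, instead of A's two comprehension passes (strip/drop-blanks, then re-filter against the first line's column count).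
import Mathlib
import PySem

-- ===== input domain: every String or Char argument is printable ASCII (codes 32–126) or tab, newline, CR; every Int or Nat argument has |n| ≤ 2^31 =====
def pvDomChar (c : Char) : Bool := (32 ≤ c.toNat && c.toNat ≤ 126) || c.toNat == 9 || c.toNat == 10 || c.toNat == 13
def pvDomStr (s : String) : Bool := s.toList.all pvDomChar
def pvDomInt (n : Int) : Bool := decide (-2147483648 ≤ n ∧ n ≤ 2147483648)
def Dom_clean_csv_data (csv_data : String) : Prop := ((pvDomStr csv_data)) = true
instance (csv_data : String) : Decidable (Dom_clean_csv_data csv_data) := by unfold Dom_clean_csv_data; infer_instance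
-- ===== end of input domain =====

-- B buckets the stripped non-empty lines by column count into a dict and returns
-- the bucket of the first kept line, instead of A's two filtering passes
-- (objective: alternative; same return value).

-- ===== PORT A =====
def clean_csv_data (csv_data : String) : String :=
  let lines := PySem.Str.splitlines csv_data
  let cleaned_lines := lines.filterMap (fun line =>
    let s := PySem.Str.strip line
    if s ≠ "" then some s else none)
  let cleaned_lines2 :=
    match cleaned_lines with
    | [] => cleaned_lines
    | h :: _ =>
      let first_line_cols := (PySem.Chars.splitOn h.toList [',']).length
      cleaned_lines.filter (fun line => (PySem.Chars.splitOn line.toList [',']).length = first_line_cols)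
  PySem.Str.join "\n" cleaned_lines2

-- ===== PORT B =====
-- body of B's loop: state = (first kept line's column count once seen, buckets by column count)
def bucketStep (st : Option Nat × PySem.Dict Nat (List String)) (line : String) :
    Option Nat × PySem.Dict Nat (List String) :=
  let s := PySem.Str.strip line
  if s = "" then st
  else
    let k := (PySem.Chars.splitOn s.toList [',']).length
    let fk := match st.1 with | none => some k | some e => some e
    -- buckets.setdefault(k, []).append(s)
    (fk, st.2.modify k [] (· ++ [s]))

def clean_csv_data_alt (csv_data : String) : String :=
  let r := (PySem.Str.splitlines csv_data).foldl bucketStep (none, PySem.Dict.empty)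
  match r.1 with
  | none => ""
  | some k => PySem.Str.join "\n" (r.2.getD k [])

-- ===== PRECONDITION & SPEC =====
def Spec_clean_csv_data (csv_data : String) (out : String) : Prop := out = clean_csv_data_alt csv_data
instance (csv_data : String) (out : String) : Decidable (Spec_clean_csv_data csv_data out) := by unfold Spec_clean_csv_data; infer_instance

-- ===== CLAIM (what is proved, stated in full; the proofs are below) =====
def Claim_equal_clean_csv_data : Prop := ∀ (csv_data : String), Dom_clean_csv_data csv_data → Spec_clean_csv_data csv_data (clean_csv_data csv_data)

-- ===== LEMMAS AND PROOFS =====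

-- A's strip-and-drop-blanks comprehension, as used by both proofs
def stripKeep (line : String) : Option String :=
  let s := PySem.Str.strip line
  if s ≠ "" then some s else none

def keyOf (l : String) : Nat := (PySem.Chars.splitOn l.toList [',']).length

lemma foldl_bucket_some (ls : List String) (e : Nat) (d : PySem.Dict Nat (List String)) :
    (ls.foldl bucketStep (some e, d)).1 = some e ∧
    ∀ c, ((ls.foldl bucketStep (some e, d)).2).getD c [] =
      d.getD c [] ++ (ls.filterMap stripKeep).filter (fun l => keyOf l = c) := by
  induction ls generalizing d with
  | nil => simp
  | cons l ls ih =>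
    by_cases h : PySem.Str.strip l = ""
    · simpa [bucketStep, stripKeep, h] using ih d
    · refine ⟨by simpa [bucketStep, h] using (ih _).1, fun c => ?_⟩
      have hrec := (ih (d.modify (keyOf (PySem.Str.strip l)) [] (· ++ [PySem.Str.strip l]))).2 c
      have hm : (d.modify (keyOf (PySem.Str.strip l)) [] (· ++ [PySem.Str.strip l])).getD c [] =
          if c = keyOf (PySem.Str.strip l) then d.getD (keyOf (PySem.Str.strip l)) [] ++ [PySem.Str.strip l]
          else d.getD c [] := PySem.Dict.getD_modify d _ _ _ _
      rw [hm] at hrec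
      by_cases hc : c = keyOf (PySem.Str.strip l)
      · subst hc
        simp [bucketStep, stripKeep, h, keyOf] at hrec ⊢
        simp [hrec]
      · rw [if_neg hc] at hrec
        have hc' : ¬ keyOf (PySem.Str.strip l) = c := fun hh => hc hh.symm
        simp [bucketStep, stripKeep, h, keyOf] at hrec hc' ⊢
        simp [hrec, hc']

lemma foldl_bucket_none (ls : List String) (d : PySem.Dict Nat (List String)) :
    match ls.filterMap stripKeep with
    | [] => ls.foldl bucketStep (none, d) = (none, d)
    | h :: t =>
        (ls.foldl bucketStep (none, d)).1 = some (keyOf h) ∧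
        ((ls.foldl bucketStep (none, d)).2).getD (keyOf h) [] =
          d.getD (keyOf h) [] ++ (h :: t).filter (fun l => keyOf l = keyOf h) := by
  induction ls generalizing d with
  | nil => simp
  | cons l ls ih =>
    by_cases h : PySem.Str.strip l = ""
    · simpa [bucketStep, stripKeep, h] using ih d
    · have hstep : bucketStep (none, d) l =
          (some (keyOf (PySem.Str.strip l)),
           d.modify (keyOf (PySem.Str.strip l)) [] (· ++ [PySem.Str.strip l])) := by
        simp [bucketStep, keyOf, h]
      have hs := foldl_bucket_some ls (keyOf (PySem.Str.strip l))
        (d.modify (keyOf (PySem.Str.strip l)) [] (· ++ [PySem.Str.strip l]))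
      have hm : (d.modify (keyOf (PySem.Str.strip l)) [] (· ++ [PySem.Str.strip l])).getD
            (keyOf (PySem.Str.strip l)) [] =
          d.getD (keyOf (PySem.Str.strip l)) [] ++ [PySem.Str.strip l] := by
        rw [PySem.Dict.getD_modify]; simp
      have h2 := hs.2 (keyOf (PySem.Str.strip l))
      rw [hm] at h2
      have hfm : (l :: ls).filterMap stripKeep
          = PySem.Str.strip l :: ls.filterMap stripKeep := by
        simp [stripKeep, h]
      rw [hfm, List.foldl_cons, hstep]
      exact ⟨hs.1, by simp [h2, List.append_assoc]⟩

-- ===== VERDICT (by name: the statement is the Claim_ definition above) =====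
theorem clean_csv_data_spec : Claim_equal_clean_csv_data := by
  intro csv_data _
  show clean_csv_data csv_data = clean_csv_data_alt csv_data
  simp only [clean_csv_data, clean_csv_data_alt]
  have hn := foldl_bucket_none (PySem.Str.splitlines csv_data) PySem.Dict.empty
  have hfm : (PySem.Str.splitlines csv_data).filterMap
      (fun line => let s := PySem.Str.strip line; if s ≠ "" then some s else none)
      = (PySem.Str.splitlines csv_data).filterMap stripKeep := rfl
  rw [hfm]
  cases hc : (PySem.Str.splitlines csv_data).filterMap stripKeep with
  | nil =>
    rw [hc] at hn
    simp only at hn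
    simp [hn, PySem.Str.join]
  | cons h t =>
    rw [hc] at hn
    simp only at hn
    obtain ⟨h1, h2⟩ := hn
    rw [h1]
    simp only [h2, PySem.Dict.getD_empty, List.nil_append]
    simp only [keyOf, List.filter_cons]
    rfl
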